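-- pv_equiv track=rewrite | github.com/corutopi/AtCorder_python | AtCoderRegularContest/110/B.py | solve
-- ===== SOURCE A (Python) =====
-- body = 10 ** 10
--
-- def solve(N, T):
--     if N == 1:
--         if T == '1':
--             return body * 2
--         else:
--             return body
--     s = -1
--     if T[:2] == '11':
--         s = 0
--     elif T[:2] == '10':
--         s = 1
--         T = '1' + T
--     elif T[:2] == '01':
--         s = 2
--         T = '11' + T
--     c1 = 0
--     c0 = 1
--     for t in T:
--         if t == '1':
--             c1 += 1
--             c0 = 0
--         if t == '0':
--             c0 += 1
--             if c1 != 2: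
--                 s = -1
--                 break
--             c1 = 0
--         if c1 > 2 or c0 > 1:
--             s = -1
--             break
--     if s < 0:
--         return 0
--     else:
--         x = (s + N) // 3 + (1 if (s + N) % 3 > 0 else 0)
--         return body - x + 1
-- ===== SOURCE B (Python) =====
-- body = 10 ** 10
--
-- def solve(N, T):
--     if N == 1:
--         return body * 2 if T == '1' else body
--     phase = {'11': 0, '10': 1, '01': 2}.get(T[:2], -1)
--     if phase < 0:
--         return 0
--     p = phase
--     for t in T:
--         if t in '01':
--             if t != '110'[p % 3]:
--                 return 0
--             p += 1
--     return body - -((phase + N) // -3) + 1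
-- ===== Notes on version B (the rewrite author's own statement) =====
-- stated objective: simpler
-- what changed: Replaces A's run-length state machine (c1/c0 counters with character prepending for the '10'/'01' prefixes) by a direct positional comparison of each '0'/'1' character against the repeating pattern '110' starting at the phase read off T[:2], and replaces the two-term ceiling x = m//3 + (1 if m%3>0 else 0) by -(m // -3).
import Mathlib
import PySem

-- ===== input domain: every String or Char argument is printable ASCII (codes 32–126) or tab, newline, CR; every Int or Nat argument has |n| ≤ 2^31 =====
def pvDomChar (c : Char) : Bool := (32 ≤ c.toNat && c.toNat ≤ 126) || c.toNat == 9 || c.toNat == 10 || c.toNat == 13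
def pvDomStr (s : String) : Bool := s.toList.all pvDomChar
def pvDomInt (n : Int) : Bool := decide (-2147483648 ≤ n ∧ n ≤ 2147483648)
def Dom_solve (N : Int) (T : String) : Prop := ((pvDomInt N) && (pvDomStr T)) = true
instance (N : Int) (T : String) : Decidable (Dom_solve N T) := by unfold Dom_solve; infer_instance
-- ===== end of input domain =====

-- B replaces A's run-length (c1/c0) state-machine validation and prepended characters by a direct
-- positional comparison against the repeating pattern '110', and A's two-term ceiling by -((phase+N)//-3).
-- Objective: simpler. Return-value equivalence only (neither mutates its arguments).

-- ===== PORT A =====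
def pvBody : Int := 10 ^ 10

-- the 'for t in T' loop of A: state (s, c1, c0); 'break' after 's = -1' is returning -1
def pvLoopA (cs : List Char) (s c1 c0 : Int) : Int :=
  match cs with
  | [] => s
  | t :: rest =>
    let c1 := if t = '1' then c1 + 1 else c1
    let c0 := if t = '1' then 0 else c0
    if t = '0' then
      let c0 := c0 + 1
      if c1 ≠ 2 then -1
      else
        let c1 := 0
        if c1 > 2 ∨ c0 > 1 then -1 else pvLoopA rest s c1 c0
    else
      if c1 > 2 ∨ c0 > 1 then -1 else pvLoopA rest s c1 c0

-- the common tail of A after s and (possibly prepended) T are fixed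
def pvTailA (N s : Int) (cs : List Char) : Int :=
  let r := pvLoopA cs s 0 1
  if r < 0 then 0
  else
    let x := PySem.Int.floordiv (s + N) 3 + (if PySem.Int.mod (s + N) 3 > 0 then 1 else 0)
    pvBody - x + 1

def solve (N : Int) (T : String) : Int :=
  if N = 1 then
    if T = "1" then pvBody * 2 else pvBody
  else
    let cs := T.toList
    if cs.take 2 = ['1', '1'] then pvTailA N 0 cs
    else if cs.take 2 = ['1', '0'] then pvTailA N 1 ('1' :: cs)
    else if cs.take 2 = ['0', '1'] then pvTailA N 2 ('1' :: '1' :: cs)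
    else pvTailA N (-1) cs

-- ===== PORT B =====
-- '110'[p % 3]
def pvPatAt (p : Int) : Char :=
  if PySem.Int.mod p 3 = 0 then '1' else if PySem.Int.mod p 3 = 1 then '1' else '0'

-- the 'for t in T' loop of B: positional check; 'return 0' on mismatch is false
def pvCheckB (cs : List Char) (p : Int) : Bool :=
  match cs with
  | [] => true
  | t :: rest =>
    if t = '0' ∨ t = '1' then
      if t ≠ pvPatAt p then false else pvCheckB rest (p + 1)
    else pvCheckB rest p

def solve_alt (N : Int) (T : String) : Int :=
  if N = 1 then
    if T = "1" then pvBody * 2 else pvBody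
  else
    let cs := T.toList
    let phase : Int :=
      if cs.take 2 = ['1', '1'] then 0
      else if cs.take 2 = ['1', '0'] then 1
      else if cs.take 2 = ['0', '1'] then 2
      else -1
    if phase < 0 then 0
    else if pvCheckB cs phase = false then 0
    else pvBody - (-(PySem.Int.floordiv (phase + N) (-3))) + 1

-- ===== PRECONDITION & SPEC =====
def Spec_solve (N : Int) (T : String) (out : Int) : Prop := out = solve_alt N T
instance (N : Int) (T : String) (out : Int) : Decidable (Spec_solve N T out) := by unfold Spec_solve; infer_instance

-- ===== CLAIM (what is proved, stated in full; the proofs are below) =====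
def Claim_equal_solve : Prop := ∀ (N : Int) (T : String), Dom_solve N T → Spec_solve N T (solve N T)

-- ===== LEMMAS AND PROOFS =====

-- A's automaton state after a valid run of length p (mod 3): c1, c0
def pvC1 (p : Int) : Int := if PySem.Int.mod p 3 = 0 then 0 else if PySem.Int.mod p 3 = 1 then 1 else 2
def pvC0 (p : Int) : Int := if PySem.Int.mod p 3 = 0 then 1 else 0

theorem pvMod3_cases (p : Int) :
    PySem.Int.mod p 3 = 0 ∨ PySem.Int.mod p 3 = 1 ∨ PySem.Int.mod p 3 = 2 := by
  have h1 := PySem.Int.mod_nonneg p (b := 3) (by norm_num)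
  have h2 := PySem.Int.mod_lt p (b := 3) (by norm_num)
  omega

theorem pvMod3_succ (p : Int) :
    PySem.Int.mod (p + 1) 3 = if PySem.Int.mod p 3 = 2 then 0 else PySem.Int.mod p 3 + 1 := by
  have e1 := PySem.Int.floordiv_mul_add_mod p (3 : Int)
  have e2 := PySem.Int.floordiv_mul_add_mod (p + 1) (3 : Int)
  have h1 := PySem.Int.mod_nonneg p (b := 3) (by norm_num)
  have h2 := PySem.Int.mod_lt p (b := 3) (by norm_num)
  have h3 := PySem.Int.mod_nonneg (p + 1) (b := 3) (by norm_num)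
  have h4 := PySem.Int.mod_lt (p + 1) (b := 3) (by norm_num)
  split_ifs <;> omega

-- core invariant: A's loop from the state of phase p agrees with B's positional check from p
theorem pvLoop_eq_check (cs : List Char) : ∀ (p s : Int),
    pvLoopA cs s (pvC1 p) (pvC0 p) = if pvCheckB cs p then s else -1 := by
  induction cs with
  | nil => intro p s; simp [pvLoopA, pvCheckB]
  | cons t rest ih =>
    intro p s
    have hsucc := pvMod3_succ p
    have ih1 := ih (p + 1) s
    have ih0 := ih p s
    rcases pvMod3_cases p with h | h | h <;>
      rw [h] at hsucc <;> norm_num at hsucc <;>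
      by_cases h1 : t = '1' <;> by_cases h0 : t = '0' <;>
        (try simp_all [pvLoopA, pvCheckB, pvPatAt, pvC1, pvC0])
    all_goals
      have hst := ih p s
      norm_num [pvC1, pvC0, h] at hst
      first
        | exact hst
        | (have hnd : ¬(3 : Int) ∣ p := by omega
           simp only [hnd, if_false] at hst
           exact hst)

theorem pvCeil3 (m : Int) :
    PySem.Int.floordiv m 3 + (if PySem.Int.mod m 3 > 0 then 1 else 0)
      = -(PySem.Int.floordiv m (-3)) := by
  have e1 := PySem.Int.floordiv_mul_add_mod m (3 : Int)
  have e2 := PySem.Int.floordiv_mul_add_mod m (-3 : Int)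
  have h1 := PySem.Int.mod_nonneg m (b := 3) (by norm_num)
  have h2 := PySem.Int.mod_lt m (b := 3) (by norm_num)
  have h3 := PySem.Int.mod_neg_bounds m (b := -3) (by norm_num)
  split_ifs <;> omega

theorem pvC1_zero : pvC1 0 = 0 := by decide
theorem pvC0_zero : pvC0 0 = 1 := by decide

-- A's tail, expressed through B's positional check (phase 0 of the check = A's initial (c1,c0)=(0,1))
theorem pvTail_eq (N s : Int) (hs : 0 ≤ s) (cs : List Char) :
    pvTailA N s cs = if pvCheckB cs 0 = false then 0
      else pvBody - (-(PySem.Int.floordiv (s + N) (-3))) + 1 := by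
  have h := pvLoop_eq_check cs 0 s
  rw [pvC1_zero, pvC0_zero] at h
  unfold pvTailA
  rw [h, pvCeil3 (s + N)]
  cases hb : pvCheckB cs 0 <;> norm_num
  exact fun h' => absurd h' (by omega)

-- stepping the check once over a matching leading '1' / '1','1'
theorem pvCheck_step1 (ts : List Char) : pvCheckB ('1' :: ts) 0 = pvCheckB ts 1 := by
  simp [pvCheckB, show pvPatAt 0 = '1' from by decide]

theorem pvCheck_step2 (ts : List Char) : pvCheckB ('1' :: '1' :: ts) 0 = pvCheckB ts 2 := by
  simp [pvCheckB, show pvPatAt 0 = '1' from by decide, show pvPatAt 1 = '1' from by decide]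

-- with s = -1 the loop returns -1 whatever happens, so A returns 0
theorem pvTail_neg (N : Int) (cs : List Char) : pvTailA N (-1) cs = 0 := by
  have h := pvLoop_eq_check cs 0 (-1)
  rw [pvC1_zero, pvC0_zero] at h
  unfold pvTailA
  rw [h]
  cases hb : pvCheckB cs 0 <;> norm_num

-- ===== VERDICT (by name: the statement is the Claim_ definition above) =====
theorem solve_spec : Claim_equal_solve := by
  intro N T _
  unfold Spec_solve solve solve_alt
  by_cases hN : N = 1
  · simp [hN]
  · simp only [hN, if_false]
    by_cases h11 : T.toList.take 2 = ['1', '1']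
    · simp [h11, pvTail_eq N 0 (by norm_num) T.toList]
    · by_cases h10 : T.toList.take 2 = ['1', '0']
      · rw [if_neg h11, if_pos h10, pvTail_eq N 1 (by norm_num) ('1' :: T.toList), pvCheck_step1]
        simp [h10]
      · by_cases h01 : T.toList.take 2 = ['0', '1']
        · rw [if_neg h11, if_neg h10, if_pos h01,
              pvTail_eq N 2 (by norm_num) ('1' :: '1' :: T.toList), pvCheck_step2]
          simp [h01]
        · simp [h11, h10, h01, pvTail_neg]
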